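-- pv_equiv track=rewrite | github.com/Vinavia/Crypto-Analyser | mod.py | mul_table
-- ===== SOURCE A (Python) =====
-- def residue(num,mod):
--     if not isinstance(num, int):
--         return 'Error(residue): Invalid num'
--     if mod < 1:
--         return 'Error(residue): Invalid mod'
--
--     residue = num % mod
--
--     return residue
--
-- def mul_table(m):
--     if m < 1 or not isinstance(m,int):
--         return 'Error(mul_table): Invalid mod'
--
--
--     table = []
--
--     for row in range(m):
--         table.append([])
--         for col in range(m):
--             table[row].append(residue(row * col,m))
--
--     return table
-- ===== SOURCE B (Python) =====
-- def mul_table(m):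
--     if m < 1 or not isinstance(m, int):
--         return 'Error(mul_table): Invalid mod'
--     table = []
--     for row in range(m):
--         cells = []
--         val = 0
--         for _ in range(m):
--             cells.append(val)
--             val = (val + row) % m
--         table.append(cells)
--     return table
-- ===== Notes on version B (the rewrite author's own statement) =====
-- stated objective: alternative
-- what changed: Each row is built by a running modular accumulator (val = (val + row) % m), replacing the per-cell multiplication residue(row*col, m) and the residue helper.
-- outside the precondition, e.g. on mul_table(0): A returns 'Error(mul_table): Invalid mod', B returns 'Error(mul_table): Invalid mod'
import Mathlib
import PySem

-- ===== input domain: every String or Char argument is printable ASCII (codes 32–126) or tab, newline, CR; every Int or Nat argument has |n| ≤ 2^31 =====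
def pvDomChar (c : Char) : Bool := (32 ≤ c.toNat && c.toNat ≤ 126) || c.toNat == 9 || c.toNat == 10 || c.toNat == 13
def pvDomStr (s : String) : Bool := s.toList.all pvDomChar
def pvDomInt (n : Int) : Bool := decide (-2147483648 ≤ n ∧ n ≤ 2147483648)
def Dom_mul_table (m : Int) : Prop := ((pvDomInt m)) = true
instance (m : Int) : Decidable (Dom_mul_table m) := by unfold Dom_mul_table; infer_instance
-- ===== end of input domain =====

-- B replaces the per-cell multiplication with a per-row running modular accumulator (alternative decomposition).

-- ===== PORT A =====
-- residue(num, mod): under Pre_ (1 ≤ m) the guard branches never fire; exact via PySem.Int.mod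
def residue (num mod : Int) : Int := PySem.Int.mod num mod

def mul_table (m : Int) : List (List Int) :=
  if m < 1 then []   -- Python returns an error STRING here; excluded by Pre_mul_table
  else
    (PySem.List.pyRange 0 m 1).foldl (fun table row =>
      table ++ [(PySem.List.pyRange 0 m 1).foldl (fun r col => r ++ [residue (row * col) m]) []]) []

-- ===== PORT B =====
def mul_table_alt (m : Int) : List (List Int) :=
  if m < 1 then []   -- same guard; error string excluded by Pre_mul_table
  else
    (PySem.List.pyRange 0 m 1).foldl (fun table row =>
      let p := (PySem.List.pyRange 0 m 1).foldl
        (fun (p : List Int × Int) _ => (p.1 ++ [p.2], PySem.Int.mod (p.2 + row) m)) ([], 0)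
      table ++ [p.1]) []

-- ===== PRECONDITION & SPEC =====
-- Pre_ excludes m < 1 (and nothing else): there Python A returns the string
-- 'Error(mul_table): Invalid mod', not a list of lists of ints.
def Pre_mul_table (m : Int) : Prop := 1 ≤ m
instance (m : Int) : Decidable (Pre_mul_table m) := by unfold Pre_mul_table; infer_instance
def pvWitness_mul_table : Int := 3

def Spec_mul_table (m : Int) (out : List (List Int)) : Prop := out = mul_table_alt m
instance (m : Int) (out : List (List Int)) : Decidable (Spec_mul_table m out) := by unfold Spec_mul_table; infer_instance

-- ===== CLAIM (what is proved, stated in full; the proofs are below) =====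
def Claim_equal_mul_table : Prop := ∀ (m : Int), Dom_mul_table m → Pre_mul_table m → Spec_mul_table m (mul_table m)

-- ===== LEMMAS AND PROOFS =====

-- B's inner loop invariant: after folding over any list l with accumulator (cells, val) =
-- (map of residues so far, (row*k) % m), the result prepends the next |l| residues.
lemma inner_loop_eq (m row : Int) (hm : 0 < m) (l : List Int) (k : Nat) (acc : List Int)
    (hacc : acc = (List.range k).map (fun c : Nat => PySem.Int.mod (row * (c : Int)) m)) :
    (l.foldl (fun (p : List Int × Int) _ => (p.1 ++ [p.2], PySem.Int.mod (p.2 + row) m))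
        (acc, PySem.Int.mod (row * k) m)).1
      = (List.range (k + l.length)).map (fun c : Nat => PySem.Int.mod (row * (c : Int)) m) := by
  induction l generalizing k acc with
  | nil => simpa using hacc
  | cons x xs ih =>
    simp only [List.foldl_cons]
    have hstep : PySem.Int.mod (PySem.Int.mod (row * k) m + row) m
        = PySem.Int.mod (row * (k + 1 : Nat)) m := by
      simp only [PySem.Int.mod_eq_emod_of_pos hm]
      rw [Int.emod_add_emod]
      congr 1
      push_cast
      ring
    rw [hstep]
    have := ih (k + 1) (acc ++ [PySem.Int.mod (row * k) m])
      (by rw [hacc, List.range_succ, List.map_append]; simp)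
    rw [List.length_cons, show k + (xs.length + 1) = k + 1 + xs.length by omega]
    exact this

theorem mul_table_row_eq (m row : Int) (hm : 0 < m) :
    ((PySem.List.pyRange 0 m 1).foldl
        (fun (p : List Int × Int) _ => (p.1 ++ [p.2], PySem.Int.mod (p.2 + row) m)) ([], 0)).1
      = (PySem.List.pyRange 0 m 1).foldl (fun r col => r ++ [residue (row * col) m]) [] := by
  have hA : (PySem.List.pyRange 0 m 1).foldl (fun r col => r ++ [residue (row * col) m]) []
      = (PySem.List.pyRange 0 m 1).map (fun col => residue (row * col) m) := by
    simpa using PySem.List.foldl_append_singleton_eq_map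
      (fun col => residue (row * col) m) (PySem.List.pyRange 0 m 1) []
  have hrange : PySem.List.pyRange 0 m 1 = (List.range m.toNat).map (fun k : Nat => (k : Int)) := by
    rw [show m = (m.toNat : Int) by omega]
    exact PySem.List.pyRange_zero_natCast m.toNat
  rw [hA, hrange]
  rw [show (([], (0:Int)) : List Int × Int)
        = (((List.range 0).map (fun c : Nat => PySem.Int.mod (row * (c : Int)) m)),
            PySem.Int.mod (row * ((0 : Nat) : Int)) m) by simp [PySem.Int.mod_eq_emod_of_pos hm]]
  rw [inner_loop_eq m row hm _ 0 _ rfl]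
  simp [residue, List.map_map]

-- ===== VERDICT (by name: the statement is the Claim_ definition above) =====
theorem mul_table_spec : Claim_equal_mul_table := by
  intro m _ hpre
  unfold Spec_mul_table mul_table mul_table_alt
  have hm : ¬ m < 1 := by simp only [Pre_mul_table] at hpre; omega
  simp only [hm, if_false]
  apply PySem.List.foldl_congr_mem
  intro table row _
  rw [mul_table_row_eq m row (by omega)]
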